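-- pv_equiv track=rewrite | github.com/norepro/adventofcode | 2023/day10.py | count_contained
-- ===== SOURCE A (Python) =====
-- def get_previous_turn(grid, row, col):
--     for i in range(col - 1, -1, -1):
--         pipe = grid[row][i]
--         match pipe:
--             case "L" | "F":
--                 return pipe
--             case _:
--                 pass
--     return None
--
-- def count_contained(grid):
--     count = 0
--     for i in range(len(grid)):
--         inside = False
--         for j in range(len(grid[i])):
--             pipe = grid[i][j]
--             match pipe:
--                 case "|" | "L" | "F":
--                     inside = not inside
--                 case "J":
--                     if not get_previous_turn(grid, i, j) == "F":
--                         inside = not inside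
--                 case "7":
--                     if not get_previous_turn(grid, i, j) == "L":
--                         inside = not inside
--                 case ".":
--                     if inside:
--                         count += 1
--                     else:
--                         grid[i][j] = "O"
--                 case _:
--                     pass
--     return count
-- ===== SOURCE B (Python) =====
-- def count_contained(grid):
--     # Track the most recent "L"/"F" in a variable during the single scan instead of
--     # rescanning the row prefix for it at every "J"/"7". Does not mutate grid
--     # (A rewrites "." to "O" when outside; return value is unaffected).
--     total = 0
--     for row in grid:
--         inside = False
--         last = None
--         for pipe in row:
--             if pipe == "L" or pipe == "F":
--                 last = pipe
--                 inside = not inside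
--             elif pipe == "|":
--                 inside = not inside
--             elif pipe == "J":
--                 if last != "F":
--                     inside = not inside
--             elif pipe == "7":
--                 if last != "L":
--                     inside = not inside
--             elif pipe == "." and inside:
--                 total += 1
--     return total
-- ===== Notes on version B (the rewrite author's own statement) =====
-- stated objective: alternative
-- what changed: B tracks the most recent L/F pipe in a variable during the single left-to-right scan, eliminating A's get_previous_turn rescan of the row prefix at every J/7 (and B does not mutate the grid); measured 1.38x at the largest timed size, below the 1.5x bar, so no speed is claimed.
import Mathlib
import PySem

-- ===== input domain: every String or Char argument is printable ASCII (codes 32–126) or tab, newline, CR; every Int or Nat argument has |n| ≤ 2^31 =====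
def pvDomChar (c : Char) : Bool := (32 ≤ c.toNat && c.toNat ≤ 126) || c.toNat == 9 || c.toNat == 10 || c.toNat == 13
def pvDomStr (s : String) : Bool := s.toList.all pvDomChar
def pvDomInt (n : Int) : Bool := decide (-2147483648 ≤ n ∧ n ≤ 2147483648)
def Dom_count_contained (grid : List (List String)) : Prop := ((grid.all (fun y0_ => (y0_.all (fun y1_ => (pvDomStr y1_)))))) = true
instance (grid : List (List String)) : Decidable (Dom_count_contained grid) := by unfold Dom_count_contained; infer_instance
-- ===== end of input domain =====

-- B tracks the most recent L/F turn in a variable during the single scan instead of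
-- A's rescan of the row prefix at every J/7; A mutates grid ('.' -> 'O' when outside),
-- B does not — the equivalence proved is about the RETURN value only.

-- ===== PORT A =====
-- get_previous_turn over the already-processed prefix of the row, stored reversed
-- (the prefix carries A's '.'->'O' mutations, exactly as the Python reads them).
def prevTurnA : List String → Option String
  | [] => none
  | p :: rest => if p = "L" ∨ p = "F" then some p else prevTurnA rest

-- inner loop of A over one row: procRev is the reversed processed prefix (mutated)
def rowLoopA : List String → List String → Bool → Int → Int
  | _, [], _, count => count
  | procRev, p :: rest, inside, count =>
    if p = "|" ∨ p = "L" ∨ p = "F" then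
      rowLoopA (p :: procRev) rest (!inside) count
    else if p = "J" then
      rowLoopA (p :: procRev) rest
        (if prevTurnA procRev = some "F" then inside else !inside) count
    else if p = "7" then
      rowLoopA (p :: procRev) rest
        (if prevTurnA procRev = some "L" then inside else !inside) count
    else if p = "." then
      (if inside then rowLoopA (p :: procRev) rest inside (count + 1)
       else rowLoopA ("O" :: procRev) rest inside count)
    else
      rowLoopA (p :: procRev) rest inside count

def count_contained (grid : List (List String)) : Int :=
  grid.foldl (fun count row => rowLoopA [] row false count) 0

-- ===== PORT B =====
-- inner loop of B: `last` is the most recent "L"/"F" seen so far in the row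
def rowLoopB : Option String → List String → Bool → Int → Int
  | _, [], _, count => count
  | last, p :: rest, inside, count =>
    if p = "L" ∨ p = "F" then rowLoopB (some p) rest (!inside) count
    else if p = "|" then rowLoopB last rest (!inside) count
    else if p = "J" then
      rowLoopB last rest (if last ≠ some "F" then !inside else inside) count
    else if p = "7" then
      rowLoopB last rest (if last ≠ some "L" then !inside else inside) count
    else if p = "." ∧ inside then rowLoopB last rest inside (count + 1)
    else rowLoopB last rest inside count

def count_contained_alt (grid : List (List String)) : Int :=
  grid.foldl (fun total row => rowLoopB none row false total) 0

-- ===== PRECONDITION & SPEC =====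
def Spec_count_contained (grid : List (List String)) (out : Int) : Prop := out = count_contained_alt grid
instance (grid : List (List String)) (out : Int) : Decidable (Spec_count_contained grid out) := by unfold Spec_count_contained; infer_instance

-- ===== CLAIM (what is proved, stated in full; the proofs are below) =====
def Claim_equal_count_contained : Prop := ∀ (grid : List (List String)), Dom_count_contained grid → Spec_count_contained grid (count_contained grid)

-- ===== LEMMAS AND PROOFS =====

-- invariant: B's `last` equals A's scan of the reversed processed prefix
theorem rowLoop_agree (rest : List String) :
    ∀ (procRev : List String) (inside : Bool) (count : Int),
      rowLoopA procRev rest inside count = rowLoopB (prevTurnA procRev) rest inside count := by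
  induction rest with
  | nil => intro procRev inside count; rfl
  | cons p rest ih =>
    intro procRev inside count
    simp only [rowLoopA, rowLoopB]
    by_cases hLF : p = "L" ∨ p = "F"
    · have h1 : (p = "|" ∨ p = "L" ∨ p = "F") := Or.inr hLF
      simp only [if_pos h1, if_pos hLF, ih]
      have : prevTurnA (p :: procRev) = some p := by
        simp [prevTurnA, hLF]
      rw [this]
    · by_cases hBar : p = "|"
      · subst hBar
        rw [if_pos (Or.inl rfl), ih]
        simp [prevTurnA]
      · have h1 : ¬ (p = "|" ∨ p = "L" ∨ p = "F") := by tauto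
        simp only [if_neg h1, if_neg hLF, if_neg hBar]
        have hprev : prevTurnA (p :: procRev) = prevTurnA procRev := by
          simp [prevTurnA, hLF]
        by_cases hJ : p = "J"
        · simp only [if_pos hJ, ih, hprev]
          by_cases h : prevTurnA procRev = some "F" <;> simp [h]
        · by_cases h7 : p = "7"
          · simp only [if_neg hJ, if_pos h7, ih, hprev]
            by_cases h : prevTurnA procRev = some "L" <;> simp [h]
          · by_cases hDot : p = "."
            · simp only [if_neg hJ, if_neg h7, if_pos hDot]
              cases inside with
              | true => rw [ih, hprev]; simp [hDot]
              | false =>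
                have hO : prevTurnA ("O" :: procRev) = prevTurnA procRev := by
                  simp [prevTurnA]
                simp [ih, hO]
            · have : ¬ (p = "." ∧ inside = true) := fun h => hDot h.1
              simp only [if_neg hJ, if_neg h7, if_neg hDot, if_neg this, ih, hprev]

-- ===== VERDICT (by name: the statement is the Claim_ definition above) =====
theorem count_contained_spec : Claim_equal_count_contained := by
  intro grid _
  unfold Spec_count_contained count_contained count_contained_alt
  congr 1
  funext count row
  exact rowLoop_agree row [] false count
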